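-- pv_equiv track=rewrite | github.com/Giftedx/crew | src/ultimate_discord_intelligence_bot/governance/communication_style.py | _improve_specificity
-- ===== SOURCE A (Python) =====
-- def _improve_specificity(response: str) -> str:
--     """Improve specificity in response."""
--     # Replace vague terms with more specific language
--     replacements = {
--         "some people": "some individuals",
--         "many people": "a significant number of individuals",
--         "it is said": "according to some sources",
--         "they say": "some sources indicate",
--     }
--
--     improved = response
--     for old, new in replacements.items():
--         improved = improved.replace(old, new)
--
--     return improved
-- ===== SOURCE B (Python) =====
-- def _improve_specificity(response: str) -> str:
--     """Improve specificity in response."""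
--     table = [("some people", "some individuals"),
--              ("many people", "a significant number of individuals"),
--              ("it is said", "according to some sources"),
--              ("they say", "some sources indicate")]
--     # single left-to-right scan: at each position substitute the first
--     # matching vague phrase, instead of one full pass per phrase
--     out = []
--     i = 0
--     n = len(response)
--     while i < n:
--         for old, new in table:
--             if response.startswith(old, i):
--                 out.append(new)
--                 i += len(old)
--                 break
--         else:
--             out.append(response[i])
--             i += 1
--     return "".join(out)
-- ===== Notes on version B (the rewrite author's own statement) =====
-- stated objective: alternative
-- what changed: B replaces A's four independent full-string replace passes by one combined left-to-right scan that, at each position, substitutes the first vague phrase matching there and otherwise copies the character.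
import Mathlib
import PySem

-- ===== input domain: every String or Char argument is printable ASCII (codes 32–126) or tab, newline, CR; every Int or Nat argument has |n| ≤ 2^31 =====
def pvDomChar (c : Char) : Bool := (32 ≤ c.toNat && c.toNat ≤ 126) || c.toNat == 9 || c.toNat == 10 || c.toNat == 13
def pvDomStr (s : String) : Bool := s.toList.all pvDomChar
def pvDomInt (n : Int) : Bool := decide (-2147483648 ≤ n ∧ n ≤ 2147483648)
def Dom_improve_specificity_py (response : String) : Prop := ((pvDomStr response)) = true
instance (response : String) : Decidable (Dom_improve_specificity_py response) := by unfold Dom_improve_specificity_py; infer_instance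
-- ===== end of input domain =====

-- B replaces A's four independent full-string replace passes by one combined
-- left-to-right scan over the fixed phrase table (objective: alternative).

-- ===== PORT A =====
-- A: dict of replacements, then one str.replace pass per (old, new) item.
def improve_specificity_py (response : String) : String :=
  let replacements : List (String × String) :=
    [("some people", "some individuals"),
     ("many people", "a significant number of individuals"),
     ("it is said", "according to some sources"),
     ("they say", "some sources indicate")]
  replacements.foldl (fun improved kv => PySem.Str.replace improved kv.1 kv.2) response

-- ===== PORT B =====
-- B's while-loop over positions; the inner for-loop over the fixed 4-entry
-- replacements dict is unrolled into the if-chain (same order as the dict).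
def pvScanB : List Char → List Char
  | [] => []
  | c :: t =>
    if List.isPrefixOf "some people".toList (c :: t) then
      "some individuals".toList ++ pvScanB (t.drop 10)
    else if List.isPrefixOf "many people".toList (c :: t) then
      "a significant number of individuals".toList ++ pvScanB (t.drop 10)
    else if List.isPrefixOf "it is said".toList (c :: t) then
      "according to some sources".toList ++ pvScanB (t.drop 9)
    else if List.isPrefixOf "they say".toList (c :: t) then
      "some sources indicate".toList ++ pvScanB (t.drop 7)
    else c :: pvScanB t
  termination_by l => l.length
  decreasing_by all_goals (simp; try omega)

def improve_specificity_py_alt (response : String) : String :=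
  String.ofList (pvScanB response.toList)

-- ===== PRECONDITION & SPEC =====
def Spec_improve_specificity_py (response : String) (out : String) : Prop := out = improve_specificity_py_alt response
instance (response : String) (out : String) : Decidable (Spec_improve_specificity_py response out) := by unfold Spec_improve_specificity_py; infer_instance

-- ===== CLAIM (what is proved, stated in full; the proofs are below) =====
def Claim_equal_improve_specificity_py : Prop := ∀ (response : String), Dom_improve_specificity_py response → Spec_improve_specificity_py response (improve_specificity_py response)

-- ===== LEMMAS AND PROOFS =====

-- clean recursion equivalent to PySem.Chars.replace for a nonempty `old`
def pvRep (o : Char) (os nw : List Char) : List Char → List Char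
  | [] => []
  | c :: t =>
    if List.isPrefixOf (o :: os) (c :: t) then nw ++ pvRep o os nw (t.drop os.length)
    else c :: pvRep o os nw t
  termination_by l => l.length
  decreasing_by all_goals (simp; try omega)

theorem pvRep_nil (o : Char) (os nw : List Char) : pvRep o os nw [] = [] := by
  rw [pvRep]

theorem pvGo_eq_rep (o : Char) (os nw : List Char) :
    ∀ (fuel : Nat) (l acc : List Char), l.length ≤ fuel →
      PySem.Chars.replace.go (o :: os) nw fuel l acc = acc.reverse ++ pvRep o os nw l := by
  intro fuel
  induction fuel with
  | zero =>
      intro l acc h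
      have : l = [] := List.eq_nil_of_length_eq_zero (Nat.le_zero.mp h)
      subst this
      rw [PySem.Chars.replace.go, pvRep_nil]
  | succ n ih =>
      intro l acc h
      cases l with
      | nil =>
          rw [PySem.Chars.replace.go] <;> first | omega | (rw [pvRep_nil]; simp)
      | cons c t =>
          rw [PySem.Chars.replace.go, pvRep]
          simp only [List.length_cons] at h
          by_cases hp : List.isPrefixOf (o :: os) (c :: t)
          · simp only [hp, if_true]
            have hd : List.drop (o :: os).length (c :: t) = t.drop os.length := by
              simp
            rw [hd, ih (t.drop os.length) (nw.reverse ++ acc) (by simp; omega)]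
            simp
          · simp only [hp, Bool.false_eq_true, if_false]
            rw [ih t (c :: acc) (by omega)]
            simp

theorem pvReplace_eq_rep (o : Char) (os nw l : List Char) :
    PySem.Chars.replace l (o :: os) nw = pvRep o os nw l := by
  unfold PySem.Chars.replace
  simp only [List.isEmpty_cons, Bool.false_eq_true, if_false]
  rw [pvGo_eq_rep o os nw l.length l [] (le_refl _)]
  simp

theorem pvPrefix_split {α : Type} (k p y : List α) (h : k <+: p ++ y) : k <+: p ∨ p <+: k := by
  by_cases hle : k.length ≤ p.length
  · left
    exact List.prefix_of_prefix_length_le h (List.prefix_append p y) hle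
  · right
    exact List.prefix_of_prefix_length_le (List.prefix_append p y) h (by omega)

-- a replace pass with replacement `nw` cannot create a new occurrence of a
-- pattern tail k, provided k is never a prefix of (a suffix of) nw
theorem pvRep_no_create (o : Char) (os nw : List Char) :
    ∀ (t k : List Char), k ≠ [] → k.length ≤ nw.length →
      (∀ n, n < k.length → ¬ (k.drop n <+: nw)) →
      k <+: pvRep o os nw t → k <+: t := by
  intro t
  induction t with
  | nil =>
      intro k hk _ _ hpre
      rw [pvRep_nil] at hpre
      exact absurd (List.prefix_nil.mp hpre) hk
  | cons c t ih =>
      intro k hk hlen hC hpre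
      rw [pvRep] at hpre
      by_cases hp : List.isPrefixOf (o :: os) (c :: t)
      · simp only [hp, if_true] at hpre
        have h0 : 0 < k.length := List.length_pos_of_ne_nil hk
        have hnc : ¬ k <+: nw := by simpa using hC 0 h0
        rcases pvPrefix_split k nw _ hpre with h1 | h2
        · exact absurd h1 hnc
        · have he : nw = k := List.IsPrefix.eq_of_length_le h2 hlen
          exact absurd (he ▸ List.prefix_refl k) hnc
      · simp only [hp, Bool.false_eq_true, if_false] at hpre
        cases k with
        | nil => exact absurd rfl hk
        | cons a k' =>
            rw [List.cons_prefix_cons] at hpre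
            obtain ⟨rfl, hk'⟩ := hpre
            cases hk'e : k' with
            | nil => simp
            | cons b k'' =>
                subst hk'e
                have : (b :: k'') <+: t := by
                  refine ih (b :: k'') (by simp) (by simp at hlen ⊢; omega) ?_ hk'
                  intro n hn
                  have := hC (n + 1) (by simp at hn ⊢; omega)
                  simpa using this
                rw [List.cons_prefix_cons]
                exact ⟨rfl, this⟩

-- a replace pass moves unchanged across a prefix p in which the pattern can
-- neither occur nor begin
theorem pvRep_append (o : Char) (os nw : List Char) :
    ∀ (p y : List Char),
      (∀ n, n < p.length → ¬ ((o :: os) <+: p.drop n) ∧ ¬ (p.drop n <+: (o :: os))) →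
      pvRep o os nw (p ++ y) = p ++ pvRep o os nw y := by
  intro p
  induction p with
  | nil => intro y _; simp
  | cons c p' ih =>
      intro y hX
      have hnp : ¬ ((o :: os) <+: (c :: p') ++ y) := by
        intro hcon
        rcases pvPrefix_split _ _ _ hcon with h1 | h2
        · exact (hX 0 (by simp)).1 (by simpa using h1)
        · exact (hX 0 (by simp)).2 (by simpa using h2)
      rw [List.cons_append, pvRep]
      have hb : List.isPrefixOf (o :: os) (c :: (p' ++ y)) = false := by
        rw [Bool.eq_false_iff]
        intro hcon
        exact hnp (by simpa [List.isPrefixOf_iff_prefix] using hcon)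
      rw [hb]
      simp only [Bool.false_eq_true, if_false]
      rw [ih y (fun n hn => by simpa using hX (n + 1) (by simp; omega))]
      simp

theorem pvRep_head_match (o : Char) (os nw x : List Char) :
    pvRep o os nw ((o :: os) ++ x) = nw ++ pvRep o os nw x := by
  rw [List.cons_append, pvRep]
  have hp : List.isPrefixOf (o :: os) (o :: (os ++ x)) = true := by
    rw [List.isPrefixOf_iff_prefix]
    exact ⟨x, by simp⟩
  rw [hp]
  simp

theorem pvRep_head_nomatch (o : Char) (os nw : List Char) (c : Char) (t : List Char)
    (h : ¬ (o :: os) <+: (c :: t)) :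
    pvRep o os nw (c :: t) = c :: pvRep o os nw t := by
  rw [pvRep]
  have hb : List.isPrefixOf (o :: os) (c :: t) = false := by
    rw [Bool.eq_false_iff]
    intro hcon
    exact h (by simpa [List.isPrefixOf_iff_prefix] using hcon)
  rw [hb]
  simp

theorem pvScan_nil : pvScanB [] = [] := by rw [pvScanB]

-- unfoldings of the scan at a position where the i-th phrase matches
theorem pvScan1 (x : List Char) :
    pvScanB ("some people".toList ++ x) = "some individuals".toList ++ pvScanB x := by
  rw [show ("some people".toList ++ x : List Char) = 's' :: ("ome people".toList ++ x) from rfl,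
      pvScanB]
  have hp : List.isPrefixOf "some people".toList ('s' :: ("ome people".toList ++ x)) = true := by
    rw [List.isPrefixOf_iff_prefix]; exact ⟨x, rfl⟩
  rw [hp]
  simp only [if_true]
  rw [List.drop_left' (by decide)]

theorem pvScan2 (x : List Char) :
    pvScanB ("many people".toList ++ x)
      = "a significant number of individuals".toList ++ pvScanB x := by
  rw [show ("many people".toList ++ x : List Char) = 'm' :: ("any people".toList ++ x) from rfl,
      pvScanB]
  have h1 : List.isPrefixOf "some people".toList ('m' :: ("any people".toList ++ x)) = false := by
    rw [Bool.eq_false_iff]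
    intro hcon
    rw [List.isPrefixOf_iff_prefix,
        show ("some people".toList : List Char) = 's' :: "ome people".toList from rfl,
        List.cons_prefix_cons] at hcon
    exact absurd hcon.1 (by decide)
  have hp : List.isPrefixOf "many people".toList ('m' :: ("any people".toList ++ x)) = true := by
    rw [List.isPrefixOf_iff_prefix]; exact ⟨x, rfl⟩
  rw [h1, hp]
  simp only [Bool.false_eq_true, if_false, if_true]
  rw [List.drop_left' (by decide)]

theorem pvScan3 (x : List Char) :
    pvScanB ("it is said".toList ++ x)
      = "according to some sources".toList ++ pvScanB x := by
  rw [show ("it is said".toList ++ x : List Char) = 'i' :: ("t is said".toList ++ x) from rfl,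
      pvScanB]
  have h1 : List.isPrefixOf "some people".toList ('i' :: ("t is said".toList ++ x)) = false := by
    rw [Bool.eq_false_iff]
    intro hcon
    rw [List.isPrefixOf_iff_prefix,
        show ("some people".toList : List Char) = 's' :: "ome people".toList from rfl,
        List.cons_prefix_cons] at hcon
    exact absurd hcon.1 (by decide)
  have h2 : List.isPrefixOf "many people".toList ('i' :: ("t is said".toList ++ x)) = false := by
    rw [Bool.eq_false_iff]
    intro hcon
    rw [List.isPrefixOf_iff_prefix,
        show ("many people".toList : List Char) = 'm' :: "any people".toList from rfl,
        List.cons_prefix_cons] at hcon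
    exact absurd hcon.1 (by decide)
  have hp : List.isPrefixOf "it is said".toList ('i' :: ("t is said".toList ++ x)) = true := by
    rw [List.isPrefixOf_iff_prefix]; exact ⟨x, rfl⟩
  rw [h1, h2, hp]
  simp only [Bool.false_eq_true, if_false, if_true]
  rw [List.drop_left' (by decide)]

theorem pvScan4 (x : List Char) :
    pvScanB ("they say".toList ++ x)
      = "some sources indicate".toList ++ pvScanB x := by
  rw [show ("they say".toList ++ x : List Char) = 't' :: ("hey say".toList ++ x) from rfl,
      pvScanB]
  have h1 : List.isPrefixOf "some people".toList ('t' :: ("hey say".toList ++ x)) = false := by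
    rw [Bool.eq_false_iff]
    intro hcon
    rw [List.isPrefixOf_iff_prefix,
        show ("some people".toList : List Char) = 's' :: "ome people".toList from rfl,
        List.cons_prefix_cons] at hcon
    exact absurd hcon.1 (by decide)
  have h2 : List.isPrefixOf "many people".toList ('t' :: ("hey say".toList ++ x)) = false := by
    rw [Bool.eq_false_iff]
    intro hcon
    rw [List.isPrefixOf_iff_prefix,
        show ("many people".toList : List Char) = 'm' :: "any people".toList from rfl,
        List.cons_prefix_cons] at hcon
    exact absurd hcon.1 (by decide)
  have h3 : List.isPrefixOf "it is said".toList ('t' :: ("hey say".toList ++ x)) = false := by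
    rw [Bool.eq_false_iff]
    intro hcon
    rw [List.isPrefixOf_iff_prefix,
        show ("it is said".toList : List Char) = 'i' :: "t is said".toList from rfl,
        List.cons_prefix_cons] at hcon
    exact absurd hcon.1 (by decide)
  have hp : List.isPrefixOf "they say".toList ('t' :: ("hey say".toList ++ x)) = true := by
    rw [List.isPrefixOf_iff_prefix]; exact ⟨x, rfl⟩
  rw [h1, h2, h3, hp]
  simp only [Bool.false_eq_true, if_false, if_true]
  rw [List.drop_left' (by decide)]

theorem pvScan_cons (c : Char) (t : List Char)
    (h1 : ¬ "some people".toList <+: (c :: t)) (h2 : ¬ "many people".toList <+: (c :: t))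
    (h3 : ¬ "it is said".toList <+: (c :: t)) (h4 : ¬ "they say".toList <+: (c :: t)) :
    pvScanB (c :: t) = c :: pvScanB t := by
  rw [pvScanB]
  rw [show (List.isPrefixOf "some people".toList (c :: t)) = false from
        Bool.eq_false_iff.mpr (fun hcon => h1 (List.isPrefixOf_iff_prefix.mp hcon)),
      show (List.isPrefixOf "many people".toList (c :: t)) = false from
        Bool.eq_false_iff.mpr (fun hcon => h2 (List.isPrefixOf_iff_prefix.mp hcon)),
      show (List.isPrefixOf "it is said".toList (c :: t)) = false from
        Bool.eq_false_iff.mpr (fun hcon => h3 (List.isPrefixOf_iff_prefix.mp hcon)),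
      show (List.isPrefixOf "they say".toList (c :: t)) = false from
        Bool.eq_false_iff.mpr (fun hcon => h4 (List.isPrefixOf_iff_prefix.mp hcon))]
  simp only [Bool.false_eq_true, if_false]

-- the four passes chained = the single scan
theorem pvChain_eq_scan :
    ∀ (N : Nat) (l : List Char), l.length ≤ N →
      pvRep 't' "hey say".toList "some sources indicate".toList
        (pvRep 'i' "t is said".toList "according to some sources".toList
          (pvRep 'm' "any people".toList "a significant number of individuals".toList
            (pvRep 's' "ome people".toList "some individuals".toList l)))
      = pvScanB l := by
  intro N
  induction N with
  | zero =>
      intro l h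
      have : l = [] := List.eq_nil_of_length_eq_zero (Nat.le_zero.mp h)
      subst this
      rw [pvRep_nil, pvRep_nil, pvRep_nil, pvRep_nil, pvScan_nil]
  | succ N ih =>
      intro l h
      by_cases h1 : "some people".toList <+: l
      · obtain ⟨x, rfl⟩ := h1
        have hx : x.length ≤ N := by
          rw [List.length_append, show ("some people".toList).length = 11 from rfl] at h
          omega
        rw [show pvRep 's' "ome people".toList "some individuals".toList
                ("some people".toList ++ x)
              = "some individuals".toList
                ++ pvRep 's' "ome people".toList "some individuals".toList x from
              pvRep_head_match 's' "ome people".toList "some individuals".toList x,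
            pvRep_append 'm' "any people".toList _ _ _ (by decide),
            pvRep_append 'i' "t is said".toList _ _ _ (by decide),
            pvRep_append 't' "hey say".toList _ _ _ (by decide),
            pvScan1 x, ih x hx]
      · by_cases h2 : "many people".toList <+: l
        · obtain ⟨x, rfl⟩ := h2
          have hx : x.length ≤ N := by
            rw [List.length_append, show ("many people".toList).length = 11 from rfl] at h
            omega
          rw [pvRep_append 's' "ome people".toList _ _ _ (by decide),
              show pvRep 'm' "any people".toList "a significant number of individuals".toList
                  ("many people".toList
                    ++ pvRep 's' "ome people".toList "some individuals".toList x)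
                = "a significant number of individuals".toList
                  ++ pvRep 'm' "any people".toList "a significant number of individuals".toList
                      (pvRep 's' "ome people".toList "some individuals".toList x) from
                pvRep_head_match 'm' "any people".toList _ _,
              pvRep_append 'i' "t is said".toList _ _ _ (by decide),
              pvRep_append 't' "hey say".toList _ _ _ (by decide),
              pvScan2 x, ih x hx]
        · by_cases h3 : "it is said".toList <+: l
          · obtain ⟨x, rfl⟩ := h3
            have hx : x.length ≤ N := by
              rw [List.length_append, show ("it is said".toList).length = 10 from rfl] at h
              omega
            rw [pvRep_append 's' "ome people".toList _ _ _ (by decide),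
                pvRep_append 'm' "any people".toList _ _ _ (by decide),
                show pvRep 'i' "t is said".toList "according to some sources".toList
                    ("it is said".toList
                      ++ pvRep 'm' "any people".toList "a significant number of individuals".toList
                          (pvRep 's' "ome people".toList "some individuals".toList x))
                  = "according to some sources".toList
                    ++ pvRep 'i' "t is said".toList "according to some sources".toList
                        (pvRep 'm' "any people".toList "a significant number of individuals".toList
                          (pvRep 's' "ome people".toList "some individuals".toList x)) from
                  pvRep_head_match 'i' "t is said".toList _ _,
                pvRep_append 't' "hey say".toList _ _ _ (by decide),
                pvScan3 x, ih x hx]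
          · by_cases h4 : "they say".toList <+: l
            · obtain ⟨x, rfl⟩ := h4
              have hx : x.length ≤ N := by
                rw [List.length_append, show ("they say".toList).length = 8 from rfl] at h
                omega
              rw [pvRep_append 's' "ome people".toList _ _ _ (by decide),
                  pvRep_append 'm' "any people".toList _ _ _ (by decide),
                  pvRep_append 'i' "t is said".toList _ _ _ (by decide),
                  show pvRep 't' "hey say".toList "some sources indicate".toList
                      ("they say".toList
                        ++ pvRep 'i' "t is said".toList "according to some sources".toList
                            (pvRep 'm' "any people".toList
                              "a significant number of individuals".toList
                              (pvRep 's' "ome people".toList "some individuals".toList x)))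
                    = "some sources indicate".toList
                      ++ pvRep 't' "hey say".toList "some sources indicate".toList
                          (pvRep 'i' "t is said".toList "according to some sources".toList
                            (pvRep 'm' "any people".toList
                              "a significant number of individuals".toList
                              (pvRep 's' "ome people".toList "some individuals".toList x))) from
                    pvRep_head_match 't' "hey say".toList _ _,
                  pvScan4 x, ih x hx]
            · cases l with
              | nil => rw [pvRep_nil, pvRep_nil, pvRep_nil, pvRep_nil, pvScan_nil]
              | cons c t =>
                  have ht : t.length ≤ N := by
                    rw [List.length_cons] at h; omega
                  rw [pvRep_head_nomatch 's' "ome people".toList _ c t h1]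
                  have hn2 : ¬ ('m' :: "any people".toList)
                      <+: (c :: pvRep 's' "ome people".toList "some individuals".toList t) := by
                    intro hcon
                    rw [List.cons_prefix_cons] at hcon
                    obtain ⟨hc, hk⟩ := hcon
                    have := pvRep_no_create 's' "ome people".toList "some individuals".toList t
                      "any people".toList (by decide) (by decide) (by decide) hk
                    exact h2 (by
                      rw [show ("many people".toList : List Char)
                            = 'm' :: "any people".toList from rfl, List.cons_prefix_cons]
                      exact ⟨hc, this⟩)
                  rw [pvRep_head_nomatch 'm' "any people".toList _ c _ hn2]
                  have hn3 : ¬ ('i' :: "t is said".toList)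
                      <+: (c :: pvRep 'm' "any people".toList
                            "a significant number of individuals".toList
                            (pvRep 's' "ome people".toList "some individuals".toList t)) := by
                    intro hcon
                    rw [List.cons_prefix_cons] at hcon
                    obtain ⟨hc, hk⟩ := hcon
                    have s2 := pvRep_no_create 'm' "any people".toList
                      "a significant number of individuals".toList _
                      "t is said".toList (by decide) (by decide) (by decide) hk
                    have s1 := pvRep_no_create 's' "ome people".toList "some individuals".toList t
                      "t is said".toList (by decide) (by decide) (by decide) s2
                    exact h3 (by
                      rw [show ("it is said".toList : List Char)
                            = 'i' :: "t is said".toList from rfl, List.cons_prefix_cons]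
                      exact ⟨hc, s1⟩)
                  rw [pvRep_head_nomatch 'i' "t is said".toList _ c _ hn3]
                  have hn4 : ¬ ('t' :: "hey say".toList)
                      <+: (c :: pvRep 'i' "t is said".toList
                            "according to some sources".toList
                            (pvRep 'm' "any people".toList
                              "a significant number of individuals".toList
                              (pvRep 's' "ome people".toList "some individuals".toList t))) := by
                    intro hcon
                    rw [List.cons_prefix_cons] at hcon
                    obtain ⟨hc, hk⟩ := hcon
                    have s3 := pvRep_no_create 'i' "t is said".toList
                      "according to some sources".toList _
                      "hey say".toList (by decide) (by decide) (by decide) hk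
                    have s2 := pvRep_no_create 'm' "any people".toList
                      "a significant number of individuals".toList _
                      "hey say".toList (by decide) (by decide) (by decide) s3
                    have s1 := pvRep_no_create 's' "ome people".toList "some individuals".toList t
                      "hey say".toList (by decide) (by decide) (by decide) s2
                    exact h4 (by
                      rw [show ("they say".toList : List Char)
                            = 't' :: "hey say".toList from rfl, List.cons_prefix_cons]
                      exact ⟨hc, s1⟩)
                  rw [pvRep_head_nomatch 't' "hey say".toList _ c _ hn4,
                      pvScan_cons c t h1 h2 h3 h4, ih t ht]

-- ===== VERDICT (by name: the statement is the Claim_ definition above) =====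
theorem improve_specificity_py_spec : Claim_equal_improve_specificity_py := by
  intro response _
  unfold Spec_improve_specificity_py improve_specificity_py improve_specificity_py_alt
  simp only [List.foldl]
  rw [← pvChain_eq_scan response.toList.length response.toList (le_refl _)]
  simp only [PySem.Str.replace, String.toList_ofList]
  rw [show ("some people" : String).toList = 's' :: ("ome people" : String).toList from rfl,
      show ("many people" : String).toList = 'm' :: ("any people" : String).toList from rfl,
      show ("it is said" : String).toList = 'i' :: ("t is said" : String).toList from rfl,
      show ("they say" : String).toList = 't' :: ("hey say" : String).toList from rfl,
      pvReplace_eq_rep, pvReplace_eq_rep, pvReplace_eq_rep, pvReplace_eq_rep]
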